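-- pv_equiv track=rewrite | github.com/greenspangle/LIN6209 | assignments/week4/username_id/username_mlw169_studentid_510886_assignsubmission_file_w4_VIVAAN.py | robberlingo
-- ===== SOURCE A (Python) =====
-- def robberlingo(a_str):
--     place = -1
--     newstr = ''
--     for character in a_str:
--         place += 1
--         if character == 'a' or character == 'e' or character == 'i' or character == 'o' or character == 'u':
--             newstr += a_str[place]
--         elif character == ' ':
--             newstr += ' '
--         else:
--             newstr += a_str[place]
--             newstr += 'o'
--             newstr += a_str[place]
--     return newstr
-- ===== SOURCE B (Python) =====
-- import re
--
-- def robberlingo(a_str):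
--     # Robber language: double every character that is not a lowercase vowel
--     # or a space, inserting 'o' between the copies; one regex substitution.
--     return re.sub(r'[^aeiou ]', lambda m: m.group() + 'o' + m.group(), a_str)
-- ===== Notes on version B (the rewrite author's own statement) =====
-- stated objective: idiomatic
-- what changed: Replaced the manual index counter and character-by-character string accumulation with a single regex substitution whose character class [^aeiou ] selects exactly the characters A's else-branch doubles.
import Mathlib
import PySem

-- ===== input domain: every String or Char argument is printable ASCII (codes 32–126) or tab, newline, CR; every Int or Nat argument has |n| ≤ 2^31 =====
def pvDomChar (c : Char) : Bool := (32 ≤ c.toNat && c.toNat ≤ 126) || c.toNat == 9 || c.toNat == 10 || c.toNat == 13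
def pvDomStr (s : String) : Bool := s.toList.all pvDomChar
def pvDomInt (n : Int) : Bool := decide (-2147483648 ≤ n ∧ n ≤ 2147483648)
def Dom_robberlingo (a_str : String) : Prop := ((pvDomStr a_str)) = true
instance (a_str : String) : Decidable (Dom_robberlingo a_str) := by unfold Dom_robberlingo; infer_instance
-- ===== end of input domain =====

-- B replaces A's index counter and per-character accumulation by a single
-- regex substitution [^aeiou ] → c+'o'+c (idiomatic; return value only).

-- ===== PORT A =====
-- A's loop: 'place' counter, 'newstr' accumulator; a_str[place] is read back
-- from the full string (always in range, so pyGet? is always some here).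
def robberlingoGo (chars : List Char) : Int → List Char → List Char → List Char
  | _, newstr, [] => newstr
  | place, newstr, c :: rest =>
    let place' := place + 1
    let g : List Char := (PySem.List.pyGet? chars place').elim [] (fun x => [x])
    if c = 'a' ∨ c = 'e' ∨ c = 'i' ∨ c = 'o' ∨ c = 'u' then
      robberlingoGo chars place' (newstr ++ g) rest
    else if c = ' ' then
      robberlingoGo chars place' (newstr ++ [' ']) rest
    else
      robberlingoGo chars place' (newstr ++ g ++ ['o'] ++ g) rest

def robberlingo (a_str : String) : String :=
  String.mk (robberlingoGo a_str.toList (-1) [] a_str.toList)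

-- ===== PORT B =====
-- the regex callback: characters outside the class [^aeiou ] pass through,
-- matched characters become c ++ 'o' ++ c
def robberlingoSub (c : Char) : List Char :=
  if c ∈ ['a', 'e', 'i', 'o', 'u', ' '] then [c] else [c, 'o', c]

def robberlingo_alt (a_str : String) : String :=
  String.mk (a_str.toList.flatMap robberlingoSub)

-- ===== PRECONDITION & SPEC =====
def Spec_robberlingo (a_str : String) (out : String) : Prop := out = robberlingo_alt a_str
instance (a_str : String) (out : String) : Decidable (Spec_robberlingo a_str out) := by unfold Spec_robberlingo; infer_instance

-- ===== CLAIM (what is proved, stated in full; the proofs are below) =====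
def Claim_equal_robberlingo : Prop := ∀ (a_str : String), Dom_robberlingo a_str → Spec_robberlingo a_str (robberlingo a_str)

-- ===== LEMMAS AND PROOFS =====

lemma robberlingoGo_eq (chars : List Char) :
    ∀ (suf pre acc : List Char), chars = pre ++ suf →
      robberlingoGo chars ((pre.length : Int) - 1) acc suf = acc ++ suf.flatMap robberlingoSub := by
  intro suf
  induction suf with
  | nil => intro pre acc _; simp [robberlingoGo]
  | cons c rest ih =>
    intro pre acc h
    have hget : PySem.List.pyGet? chars ((pre.length : Int) - 1 + 1) = some c := by
      have : ((pre.length : Int) - 1 + 1) = (pre.length : Int) := by ring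
      rw [this, h]
      exact PySem.List.pyGet?_append_length pre rest c
    have hlen : ((pre ++ [c]).length : Int) - 1 = (pre.length : Int) - 1 + 1 := by
      simp only [List.length_append, List.length_cons, List.length_nil]; push_cast; ring
    have h' : chars = (pre ++ [c]) ++ rest := by simpa using h
    by_cases hv : c = 'a' ∨ c = 'e' ∨ c = 'i' ∨ c = 'o' ∨ c = 'u'
    · have hsub : robberlingoSub c = [c] := by
        rcases hv with h1 | h1 | h1 | h1 | h1 <;> subst h1 <;> decide
      simp only [robberlingoGo, hget, if_pos hv, Option.elim]
      rw [← hlen, ih (pre ++ [c]) (acc ++ [c]) h']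
      simp [hsub]
    · by_cases hs : c = ' '
      · subst hs
        simp only [robberlingoGo, hget, if_neg hv, Option.elim]
        rw [← hlen, ih (pre ++ [' ']) (acc ++ [' ']) h']
        simp [robberlingoSub, List.flatMap_cons]
      · have hsub : robberlingoSub c = [c, 'o', c] := by
          unfold robberlingoSub
          rw [if_neg]
          intro hmem
          simp only [List.mem_cons, List.not_mem_nil, or_false] at hmem
          rcases hmem with h1 | h1 | h1 | h1 | h1 | h1 <;> first
            | exact hs h1
            | exact hv (by simp [h1])
        simp only [robberlingoGo, hget, if_neg hv, if_neg hs, Option.elim]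
        rw [← hlen, ih (pre ++ [c]) (acc ++ [c] ++ ['o'] ++ [c]) h']
        simp [hsub]

-- ===== VERDICT (by name: the statement is the Claim_ definition above) =====
theorem robberlingo_spec : Claim_equal_robberlingo := by
  intro a_str _
  unfold Spec_robberlingo robberlingo robberlingo_alt
  have := robberlingoGo_eq a_str.toList a_str.toList [] [] (by simp)
  simpa using congrArg String.mk this
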